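-- pv_equiv track=rewrite | github.com/MatanH1/Python_Projects | nonogram.py | get_intersection_row
-- ===== SOURCE A (Python) =====
-- NEUTRAL = -1
--
-- def get_intersection_row(rows):
--     """
--
--     :param rows: All possible rows from the variation function.
--     :return: Intersction among them all.
--     """
--     if rows == []:
--         return None
--     if len(rows) == 1:
--         return rows[0]
--     changed_definetly = False
--     lst = []
--     for i in range(len(rows[0])):
--         for j in range(1, len(rows)):
--             if rows[0][i] != rows[j][i]:
--                 if rows[j][i] != NEUTRAL:
--                     changed_definetly = True
--                     break
--         if changed_definetly:
--             lst.append(NEUTRAL)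
--         else:
--             lst.append(rows[j][i])
--         changed_definetly = False
--     return lst
-- ===== SOURCE B (Python) =====
-- NEUTRAL = -1
--
-- def get_intersection_row(rows):
--     if rows == []:
--         return None
--     if len(rows) == 1:
--         return rows[0]
--     first = rows[0]
--     # single left-to-right pass over the remaining rows, merging column states:
--     # state[i] = (latched-to-NEUTRAL?, value seen in the current row)
--     state = [(False, 0)] * len(first)
--     for row in rows[1:]:
--         state = [(True, 0) if latched or (v != f and v != NEUTRAL) else (False, v)
--                  for (latched, _), v, f in zip(state, row, first)]
--     return [NEUTRAL if latched else v for latched, v in state]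
-- ===== Notes on version B (the rewrite author's own statement) =====
-- stated objective: alternative
-- what changed: Replaces A's column-outer loop with a per-column break over the other rows by a single row-major left-to-right pass that merges each row into a list of per-column (latched-to-NEUTRAL, current value) states built with zip.
-- outside the precondition, e.g. on get_intersection_row([[0], [1], []]): A returns [-1], B returns []
import Mathlib
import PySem

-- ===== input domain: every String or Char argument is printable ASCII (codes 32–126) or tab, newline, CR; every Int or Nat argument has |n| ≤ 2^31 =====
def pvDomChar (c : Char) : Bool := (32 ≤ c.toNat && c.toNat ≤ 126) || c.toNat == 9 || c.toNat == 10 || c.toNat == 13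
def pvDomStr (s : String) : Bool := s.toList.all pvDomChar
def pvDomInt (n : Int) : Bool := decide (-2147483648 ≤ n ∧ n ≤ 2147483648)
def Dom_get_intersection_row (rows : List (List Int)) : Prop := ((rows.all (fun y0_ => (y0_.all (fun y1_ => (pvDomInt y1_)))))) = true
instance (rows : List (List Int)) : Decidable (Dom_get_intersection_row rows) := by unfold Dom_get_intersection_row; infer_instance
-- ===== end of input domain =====

-- B replaces A's column-outer/row-inner scan with a single row-major pass that merges
-- per-column states (latched-to-NEUTRAL flag, current value) via zip; objective: alternative decomposition.

def pvNEUTRAL : Int := -1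

-- ===== PORT A =====
-- inner 'for j in range(1, len(rows))' loop with break, walked over the rows after the
-- first; the second component is the loop variable's row (rows[j]) when the loop ends.
def aInner (first : List Int) (i : Nat) : List (List Int) → Bool × List Int
  | [] => (false, [])
  | [r] => (decide (first.getD i 0 ≠ r.getD i 0) && decide (r.getD i 0 ≠ pvNEUTRAL), r)
  | r :: r' :: rs =>
      if decide (first.getD i 0 ≠ r.getD i 0) && decide (r.getD i 0 ≠ pvNEUTRAL) then (true, r)
      else aInner first i (r' :: rs)

def get_intersection_row (rows : List (List Int)) : Option (List Int) :=
  if rows = [] then none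
  else if rows.length = 1 then some (rows.headD [])
  else
    let first := rows.headD []
    some ((List.range first.length).foldl
      (fun lst i =>
        let cr := aInner first i (rows.drop 1)
        lst ++ [if cr.1 then pvNEUTRAL else cr.2.getD i 0]) [])

-- ===== PORT B =====
-- one comprehension step of B: rebuild the column-state list from (state, row, first) triples
def bStep (first : List Int) (state : List (Bool × Int)) (row : List Int) : List (Bool × Int) :=
  (state.zip (row.zip first)).map (fun p =>
    if p.1.1 || (decide (p.2.1 ≠ p.2.2) && decide (p.2.1 ≠ pvNEUTRAL)) then (true, (0:Int))
    else (false, p.2.1))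

def get_intersection_row_alt (rows : List (List Int)) : Option (List Int) :=
  if rows = [] then none
  else if rows.length = 1 then some (rows.headD [])
  else
    let first := rows.headD []
    let final := (rows.drop 1).foldl (bStep first) (List.replicate first.length (false, (0:Int)))
    some (final.map (fun p => if p.1 then pvNEUTRAL else p.2))

-- ===== PRECONDITION & SPEC =====
-- Pre_ excludes ragged inputs (some row shorter than rows[0]): there A raises IndexError unless
-- an earlier row's conflict happens to break out of the column scan first — an accident of A's
-- break order no caller would rely on; B's zip-based merge truncates to the shortest row instead.
def Pre_get_intersection_row (rows : List (List Int)) : Prop :=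
  ∀ r ∈ rows, (rows.headD []).length ≤ r.length
instance (rows : List (List Int)) : Decidable (Pre_get_intersection_row rows) := by
  unfold Pre_get_intersection_row; infer_instance

def pvWitness_get_intersection_row : List (List Int) := [[0, -1], [1, -1]]

def Spec_get_intersection_row (rows : List (List Int)) (out : Option (List Int)) : Prop := out = get_intersection_row_alt rows
instance (rows : List (List Int)) (out : Option (List Int)) : Decidable (Spec_get_intersection_row rows out) := by unfold Spec_get_intersection_row; infer_instance

-- ===== CLAIM (what is proved, stated in full; the proofs are below) =====
def Claim_equal_get_intersection_row : Prop := ∀ (rows : List (List Int)), Dom_get_intersection_row rows → Pre_get_intersection_row rows → Spec_get_intersection_row rows (get_intersection_row rows)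

-- ===== LEMMAS AND PROOFS =====

theorem foldl_append_map {α β : Type} (f : α → β) (xs : List α) (acc : List β) :
    List.foldl (fun lst i => lst ++ [f i]) acc xs = acc ++ xs.map f := by
  induction xs generalizing acc with
  | nil => simp
  | cons x xs ih => simp [List.foldl, ih]

theorem decide_ne_comm (a b : Int) : decide (a ≠ b) = decide (b ≠ a) :=
  decide_eq_decide.mpr ne_comm

theorem aInner_fst (first : List Int) (i : Nat) (tail : List (List Int)) (h : tail ≠ []) :
    (aInner first i tail).1
      = tail.any (fun r => decide (first.getD i 0 ≠ r.getD i 0) && decide (r.getD i 0 ≠ pvNEUTRAL)) := by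
  induction tail with
  | nil => exact absurd rfl h
  | cons r rs ih =>
    cases rs with
    | nil =>
      show (decide (first.getD i 0 ≠ r.getD i 0) && decide (r.getD i 0 ≠ pvNEUTRAL), r).1 = _
      rw [List.any_cons, List.any_nil, Bool.or_false]
    | cons r' rs' =>
      show (if (decide (first.getD i 0 ≠ r.getD i 0) && decide (r.getD i 0 ≠ pvNEUTRAL)) = true
            then ((true : Bool), r) else aInner first i (r' :: rs')).1 = _
      rw [List.any_cons]
      cases hc : (decide (first.getD i 0 ≠ r.getD i 0) && decide (r.getD i 0 ≠ pvNEUTRAL)) with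
      | true => rw [if_pos rfl, Bool.true_or]
      | false => rw [if_neg (by simp), Bool.false_or]; exact ih (by simp)

theorem aInner_snd (first : List Int) (i : Nat) (tail : List (List Int)) (h : tail ≠ [])
    (hf : (aInner first i tail).1 = false) :
    (aInner first i tail).2 = tail.getLast h := by
  induction tail with
  | nil => exact absurd rfl h
  | cons r rs ih =>
    cases rs with
    | nil => rfl
    | cons r' rs' =>
      have hunf : aInner first i (r :: r' :: rs')
          = if (decide (first.getD i 0 ≠ r.getD i 0) && decide (r.getD i 0 ≠ pvNEUTRAL)) = true
            then ((true : Bool), r) else aInner first i (r' :: rs') := rfl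
      rw [hunf] at hf ⊢
      by_cases hc : (decide (first.getD i 0 ≠ r.getD i 0) && decide (r.getD i 0 ≠ pvNEUTRAL)) = true
      · rw [if_pos hc] at hf; exact absurd hf (by simp)
      · rw [if_neg hc] at hf ⊢
        rw [ih (by simp) hf]
        exact (List.getLast_cons (by simp)).symm

theorem bStep_length (first : List Int) (state : List (Bool × Int)) (row : List Int)
    (h1 : state.length ≤ row.length) (h2 : state.length ≤ first.length) :
    (bStep first state row).length = state.length := by
  simp [bStep]; omega

theorem bStep_getElem (first : List Int) (state : List (Bool × Int)) (row : List Int)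
    (i : Nat) (hi : i < state.length) (h1 : i < row.length) (h2 : i < first.length) :
    (bStep first state row)[i]'(by simp [bStep]; omega)
      = (if ((state[i]'hi).1 || (decide (first.getD i 0 ≠ row.getD i 0) && decide (row.getD i 0 ≠ pvNEUTRAL))) = true
         then ((true : Bool), (0:Int)) else ((false : Bool), row.getD i 0)) := by
  have e1 : row.getD i 0 = row[i]'h1 := List.getD_eq_getElem _ _ h1
  have e2 : first.getD i 0 = first[i]'h2 := List.getD_eq_getElem _ _ h2
  simp only [bStep, List.getElem_map, List.getElem_zip]
  rw [e1, e2, decide_ne_comm (first[i]'h2) (row[i]'h1)]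

theorem foldl_bStep_length (first : List Int) (tail : List (List Int)) :
    ∀ (state : List (Bool × Int)), (∀ r ∈ tail, state.length ≤ r.length) →
    state.length ≤ first.length →
    (tail.foldl (bStep first) state).length = state.length := by
  induction tail with
  | nil => intro state _ _; simp
  | cons r rs ih =>
    intro state hr hf
    have h1 : state.length ≤ r.length := hr r (by simp)
    have hl := bStep_length first state r h1 hf
    simp only [List.foldl_cons]
    rw [ih (bStep first state r) (by intro r' hr'; rw [hl]; exact hr r' (by simp [hr'])) (by omega), hl]

theorem if_fst_or {c d : Bool} {v L : Int} :
    (if ((if c = true then ((true:Bool), (0:Int)) else ((false:Bool), v)).1 || d) = true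
     then ((true:Bool), (0:Int)) else ((false:Bool), L))
      = if (c || d) = true then ((true:Bool), (0:Int)) else ((false:Bool), L) := by
  cases c <;> simp

theorem foldl_bStep_getElem (first : List Int) (tail : List (List Int)) (htail : tail ≠ []) :
    ∀ (state : List (Bool × Int)) (i : Nat) (hi : i < state.length)
    (hr : ∀ r ∈ tail, state.length ≤ r.length) (hf : state.length ≤ first.length),
    (tail.foldl (bStep first) state)[i]'(by rw [foldl_bStep_length first tail state hr hf]; exact hi)
      = (if ((state[i]'hi).1 || tail.any (fun r => decide (first.getD i 0 ≠ r.getD i 0) && decide (r.getD i 0 ≠ pvNEUTRAL))) = true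
         then ((true : Bool), (0:Int)) else ((false : Bool), (tail.getLast htail).getD i 0)) := by
  induction tail with
  | nil => exact absurd rfl htail
  | cons r rs ih =>
    intro state i hi hr hf
    have h1 : state.length ≤ r.length := hr r (by simp)
    have hl := bStep_length first state r h1 hf
    have hstep := bStep_getElem first state r i hi (by omega) (by omega)
    cases rs with
    | nil =>
      simp only [List.foldl_cons, List.foldl_nil]
      rw [hstep, List.any_cons, List.any_nil, Bool.or_false]
      rfl
    | cons r' rs' =>
      have hrsne : r' :: rs' ≠ [] := by simp
      refine Eq.trans (ih hrsne (bStep first state r) i (by omega)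
        (by intro x hx; rw [hl]; exact hr x (by simp [hx])) (by omega)) ?_
      conv_rhs => rw [List.any_cons, List.getLast_cons hrsne]
      rw [hstep, if_fst_or, Bool.or_assoc]

theorem get_intersection_row_main (rows : List (List Int))
    (hpre : Pre_get_intersection_row rows) :
    get_intersection_row rows = get_intersection_row_alt rows := by
  match rows with
  | [] => rfl
  | [r] => rfl
  | a :: b :: t =>
    have hne : (a :: b :: t) ≠ [] := by simp
    have hlen : (a :: b :: t).length ≠ 1 := by simp
    unfold get_intersection_row get_intersection_row_alt
    rw [if_neg hne, if_neg hlen, if_neg hne, if_neg hlen]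
    simp only [List.headD_cons, List.drop_succ_cons, List.drop_zero]
    set first := a with hfirst
    set tail := b :: t with htail
    have htne : tail ≠ [] := by rw [htail]; simp
    have hpret : ∀ r ∈ tail, first.length ≤ r.length := by
      intro r hr
      have := hpre r (List.mem_cons_of_mem _ hr)
      simpa using this
    congr 1
    rw [foldl_append_map, List.nil_append]
    have hrepl : ∀ r ∈ tail, (List.replicate first.length ((false : Bool), (0:Int))).length ≤ r.length := by
      intro r hr; rw [List.length_replicate]; exact hpret r hr
    have hreplf : (List.replicate first.length ((false : Bool), (0:Int))).length ≤ first.length := by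
      rw [List.length_replicate]
    have hflen : (tail.foldl (bStep first) (List.replicate first.length ((false : Bool), (0:Int)))).length
        = first.length := by
      rw [foldl_bStep_length first tail _ hrepl hreplf, List.length_replicate]
    apply List.ext_getElem
    · simp [hflen]
    · intro i hi1 hi2
      have hi : i < first.length := by simpa using hi1
      simp only [List.getElem_map, List.getElem_range]
      rw [foldl_bStep_getElem first tail htne (List.replicate first.length ((false : Bool), (0:Int))) i
        (by rw [List.length_replicate]; exact hi) hrepl hreplf]
      rw [List.getElem_replicate]
      rw [aInner_fst first i tail htne]
      cases hany : tail.any (fun r => decide (first.getD i 0 ≠ r.getD i 0) && decide (r.getD i 0 ≠ pvNEUTRAL)) with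
      | true => simp
      | false =>
        have hfa : (aInner first i tail).1 = false := by
          rw [aInner_fst first i tail htne]; exact hany
        simp [aInner_snd first i tail htne hfa]

-- ===== VERDICT (by name: the statement is the Claim_ definition above) =====
theorem get_intersection_row_spec : Claim_equal_get_intersection_row := by
  intro rows _ hpre
  unfold Spec_get_intersection_row
  exact get_intersection_row_main rows hpre
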